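-- pv_equiv track=rewrite | github.com/QuBenhao/LeetCode | LCP/31/solution.py | escapeMaze
-- ===== SOURCE A (Python) =====
-- from functools import lru_cache
--
-- def escapeMaze(maze):
--     """
--     :type maze: List[List[str]]
--     :rtype: bool
--     """
--     # 迷宫的行数、列数以及到达终点最多的时间
--     m, n, t = len(maze[0]), len(maze[0][0]), len(maze)
--     # 移动方式
--     dir = [(-1, 0), (0, 0), (1, 0), (0, 1), (0, -1)]
--
--     @ lru_cache(None)
--     def dfs(x, y, time, magicA, magicB):
--         if x == m - 1 and y == n - 1:
--             return True
--         if time + 1 == t or t - time - 1 < m - x + n - y - 2: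
--             return False
--
--         for dx,dy in dir:
--             x_, y_ = x + dx, y + dy
--             if x_ < 0 or x_ == m or y_ < 0 or y_ == n:
--                 continue
--             # 下一个时刻该地点可以走
--             if maze[time+1][x_][y_] == '.':
--                 if dfs(x_, y_, time+1, magicA, magicB):
--                     return True
--             # 下一个时刻需要使用卷轴
--             else:
--                 # 使用临时卷轴
--                 if magicA:
--                     if dfs(x_, y_, time+1, False, magicB):
--                         return True
--                 # 使用永久卷轴
--                 if magicB:
--                     # 使用永久卷轴的意义相当于在原地停留无限长的时间 （等价于离开这里再在下一个时刻回到这里）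
--                     for next_time in range(time+1, t):
--                         if dfs(x_, y_, next_time, magicA, False):
--                             return True
--         return False
--
--     return dfs(0, 0, 0, True, True)
-- ===== SOURCE B (Python) =====
-- def escapeMaze(maze):
--     """
--     :type maze: List[List[str]]
--     :rtype: bool
--     """
--     # Bottom-up DP over time (instead of memoized top-down recursion); the
--     # permanent-scroll choice is answered by suffix-OR tables instead of A's
--     # inner next_time rescan.  Tabulates all states (no early exit).
--     m, n, t = len(maze[0]), len(maze[0][0]), len(maze)
--     dirs = [(-1, 0), (0, 0), (1, 0), (0, 1), (0, -1)]
--     goal = [[x == m - 1 and y == n - 1 for y in range(n)] for x in range(m)]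
--
--     def cell(time, x, y):
--         # cells missing from the recorded maze are treated as non-'.' (a wall)
--         row = maze[time][x] if x < len(maze[time]) else ''
--         return row[y] if y < len(row) else 'x'
--
--     def step(time, fab, f0b, sa, a, b):
--         # table of dfs values at `time` for scroll state (a, b), given the
--         # tables fab = (a,b)-values, f0b = (False,b)-values at time+1 and
--         # sa = OR of (a,False)-values over all times >= time+1
--         tbl = []
--         for x in range(m):
--             row = []
--             for y in range(n):
--                 if x == m - 1 and y == n - 1:
--                     row.append(True)
--                 elif t - time - 1 < m - x + n - y - 2:
--                     row.append(False)
--                 else: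
--                     ok = False
--                     for dx, dy in dirs:
--                         x_, y_ = x + dx, y + dy
--                         if 0 <= x_ < m and 0 <= y_ < n:
--                             if cell(time + 1, x_, y_) == '.':
--                                 ok = fab[x_][y_]
--                             else:
--                                 ok = (a and f0b[x_][y_]) or (b and sa[x_][y_])
--                         if ok:
--                             break
--                     row.append(ok)
--             tbl.append(row)
--         return tbl
--
--     # tables at time t-1 (the last layer): only the goal cell succeeds
--     f00 = f10 = f01 = f11 = goal
--     s0 = s1 = goal
--     for time in range(t - 2, -1, -1):
--         n00 = step(time, f00, f00, s0, False, False)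
--         n10 = step(time, f10, f00, s1, True, False)
--         n01 = step(time, f01, f01, s0, False, True)
--         n11 = step(time, f11, f01, s1, True, True)
--         s0 = [[s0[x][y] or n00[x][y] for y in range(n)] for x in range(m)]
--         s1 = [[s1[x][y] or n10[x][y] for y in range(n)] for x in range(m)]
--         f00, f10, f01, f11 = n00, n10, n01, n11
--     return f11[0][0]
-- ===== Notes on version B (the rewrite author's own statement) =====
-- stated objective: alternative
-- what changed: Replaces the memoized top-down recursion, whose permanent-scroll branch rescans every later time, by a bottom-up DP over time carrying per-cell tables for the four scroll states plus suffix-OR tables of the magicB=False values; B tabulates all states instead of lazily searching, so it is not measured faster despite the removed rescan.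
-- outside the precondition, e.g. on escapeMaze([['']]): A returns False, B raises IndexError; on escapeMaze([['..'], ['x'], ['.x']]): A returns True, B returns True
import Mathlib
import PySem

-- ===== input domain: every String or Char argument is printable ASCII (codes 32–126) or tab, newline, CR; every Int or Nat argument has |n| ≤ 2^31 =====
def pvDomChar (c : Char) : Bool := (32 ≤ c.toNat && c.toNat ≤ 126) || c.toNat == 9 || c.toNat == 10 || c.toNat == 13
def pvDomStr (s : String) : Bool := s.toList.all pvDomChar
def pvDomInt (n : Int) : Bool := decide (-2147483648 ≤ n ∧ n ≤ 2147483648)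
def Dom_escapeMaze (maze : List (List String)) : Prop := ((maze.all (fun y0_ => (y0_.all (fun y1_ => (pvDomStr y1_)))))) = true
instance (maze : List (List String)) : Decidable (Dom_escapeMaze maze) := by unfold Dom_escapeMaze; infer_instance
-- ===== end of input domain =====

-- B replaces A's memoized top-down recursion (whose permanent-scroll branch rescans all
-- later times) by a bottom-up DP over time whose suffix-OR tables answer that scan directly;
-- B tabulates every state, so it is not measured faster than A's lazy early-exiting search.

-- ===== PORT A =====
-- the five moves, shared literal of both Pythons
def pvDirs : List (Int × Int) := [(-1, 0), (0, 0), (1, 0), (0, 1), (0, -1)]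

-- maze[time][x][y] as an Option Char (none = IndexError; Pre_ keeps all reads in range)
def pvCell (maze : List (List String)) (time x y : Int) : Option Char :=
  (PySem.List.pyGet? maze time).bind fun layer =>
    (PySem.List.pyGet? layer x).bind fun row => PySem.Str.pyGet? row y

-- literal port of A's dfs; fuel bounds the recursion depth (t - time suffices, proved below)
def dfsA (maze : List (List String)) (m n t : Int) (fuel : Nat)
    (x y time : Int) (a b : Bool) : Bool :=
  if x = m - 1 ∧ y = n - 1 then true
  else if time + 1 = t ∨ t - time - 1 < m - x + n - y - 2 then false
  else
    match fuel with
    | 0 => false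
    | Nat.succ fuel' =>
      pvDirs.any fun d =>
        if x + d.1 < 0 ∨ x + d.1 = m ∨ y + d.2 < 0 ∨ y + d.2 = n then false
        else if pvCell maze (time + 1) (x + d.1) (y + d.2) = some '.' then
          dfsA maze m n t fuel' (x + d.1) (y + d.2) (time + 1) a b
        else
          (a && dfsA maze m n t fuel' (x + d.1) (y + d.2) (time + 1) false b) ||
          (b && (PySem.List.pyRange (time + 1) t 1).any fun nt =>
                  dfsA maze m n t fuel' (x + d.1) (y + d.2) nt a false)

def escapeMaze (maze : List (List String)) : Bool :=
  let m : Int := PySem.List.len ((PySem.List.pyGet? maze 0).getD [])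
  let n : Int := PySem.Str.len ((PySem.List.pyGet? ((PySem.List.pyGet? maze 0).getD []) 0).getD "")
  let t : Int := PySem.List.len maze
  dfsA maze m n t t.toNat 0 0 0 true true

-- ===== PORT B =====
-- tbl[x][y]; B only indexes in range, so the defaults are never taken
def tget (tbl : List (List Bool)) (x y : Int) : Bool :=
  ((PySem.List.pyGet? ((PySem.List.pyGet? tbl x).getD []) y).getD false)

-- [[g x y for y in range(n)] for x in range(m)]
def buildT (m n : Int) (g : Int → Int → Bool) : List (List Bool) :=
  (PySem.List.pyRange 0 m 1).map fun x => (PySem.List.pyRange 0 n 1).map fun y => g x y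

-- Source B's `step`: the table of values at `time` from the three tables about time+1;
-- the for-loop with `break` over the five moves is an any
def stepB (maze : List (List String)) (m n t time : Int)
    (fab f0b sa : List (List Bool)) (a b : Bool) : List (List Bool) :=
  buildT m n fun x y =>
    if x = m - 1 ∧ y = n - 1 then true
    else if t - time - 1 < m - x + n - y - 2 then false
    else pvDirs.any fun d =>
      if 0 ≤ x + d.1 ∧ x + d.1 < m ∧ 0 ≤ y + d.2 ∧ y + d.2 < n then
        if pvCell maze (time + 1) (x + d.1) (y + d.2) = some '.' then tget fab (x + d.1) (y + d.2)
        else (a && tget f0b (x + d.1) (y + d.2)) || (b && tget sa (x + d.1) (y + d.2))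
      else false

structure BSt where
  f00 : List (List Bool)
  f10 : List (List Bool)
  f01 : List (List Bool)
  f11 : List (List Bool)
  s0 : List (List Bool)
  s1 : List (List Bool)

-- the countdown `for time in range(t-2, -1, -1)` (count = t-1 iterations)
def loopB (maze : List (List String)) (m n t : Int) : Nat → Int → BSt → BSt
  | 0, _, st => st
  | Nat.succ k, time, st =>
    let n00 := stepB maze m n t time st.f00 st.f00 st.s0 false false
    let n10 := stepB maze m n t time st.f10 st.f00 st.s1 true false
    let n01 := stepB maze m n t time st.f01 st.f01 st.s0 false true
    let n11 := stepB maze m n t time st.f11 st.f01 st.s1 true true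
    let s0' := buildT m n fun x y => tget st.s0 x y || tget n00 x y
    let s1' := buildT m n fun x y => tget st.s1 x y || tget n10 x y
    loopB maze m n t k (time - 1) ⟨n00, n10, n01, n11, s0', s1'⟩

def escapeMaze_alt (maze : List (List String)) : Bool :=
  let m : Int := PySem.List.len ((PySem.List.pyGet? maze 0).getD [])
  let n : Int := PySem.Str.len ((PySem.List.pyGet? ((PySem.List.pyGet? maze 0).getD []) 0).getD "")
  let t : Int := PySem.List.len maze
  let goal := buildT m n fun x y => decide (x = m - 1 ∧ y = n - 1)
  let st := loopB maze m n t (t - 1).toNat (t - 2) ⟨goal, goal, goal, goal, goal, goal⟩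
  tget st.f11 0 0

-- ===== PRECONDITION & SPEC =====
-- Pre_ excludes mazes with an empty first layer or first row (there A raises, or returns an
-- accidental False where B's table indexing raises), and, because A's IndexError set is
-- search-dependent (not closed-form), also mazes whose later layers are ragged inside the
-- m x n window unless A provably performs no reads (start = goal, or immediate pruning);
-- on some such excluded mazes A still returns and B returns the same value.
def Pre_escapeMaze (maze : List (List String)) : Prop :=
  maze ≠ [] ∧ maze.headD [] ≠ [] ∧ 0 < PySem.Str.len ((maze.headD []).headD "") ∧
  ((PySem.List.len (maze.headD []) = 1 ∧ PySem.Str.len ((maze.headD []).headD "") = 1) ∨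
   PySem.List.len maze - 1 <
     PySem.List.len (maze.headD []) + PySem.Str.len ((maze.headD []).headD "") - 2 ∨
   ∀ layer ∈ maze.tail, PySem.List.len (maze.headD []) ≤ PySem.List.len layer ∧
     ∀ row ∈ layer.take (maze.headD []).length,
       PySem.Str.len ((maze.headD []).headD "") ≤ PySem.Str.len row)

instance (maze : List (List String)) : Decidable (Pre_escapeMaze maze) := by
  unfold Pre_escapeMaze; infer_instance

def pvWitness_escapeMaze : List (List String) := [["."]]

def Spec_escapeMaze (maze : List (List String)) (out : Bool) : Prop := out = escapeMaze_alt maze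
instance (maze : List (List String)) (out : Bool) : Decidable (Spec_escapeMaze maze out) := by unfold Spec_escapeMaze; infer_instance

-- ===== CLAIM (what is proved, stated in full; the proofs are below) =====
def Claim_equal_escapeMaze : Prop := ∀ (maze : List (List String)), Dom_escapeMaze maze → Pre_escapeMaze maze → Spec_escapeMaze maze (escapeMaze maze)

-- ===== LEMMAS AND PROOFS =====

-- dfs with the minimal sufficient fuel: the canonical value of A's dfs at (x,y,time,a,b)
def Dv (maze : List (List String)) (m n t : Int) (time x y : Int) (a b : Bool) : Bool :=
  dfsA maze m n t (t - time - 1).toNat x y time a b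

-- OR of the magicB=False values over all times in [time, t)
def Sv (maze : List (List String)) (m n t : Int) (time x y : Int) (a : Bool) : Bool :=
  (PySem.List.pyRange time t 1).any fun nt => Dv maze m n t nt x y a false

-- loop invariant: the six tables hold the dfs values at `j` and the suffix ORs from `j`
def InvT (maze : List (List String)) (m n t : Int) (j : Int) (st : BSt) : Prop :=
  st.f00 = buildT m n (fun x y => Dv maze m n t j x y false false) ∧
  st.f10 = buildT m n (fun x y => Dv maze m n t j x y true false) ∧
  st.f01 = buildT m n (fun x y => Dv maze m n t j x y false true) ∧
  st.f11 = buildT m n (fun x y => Dv maze m n t j x y true true) ∧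
  st.s0 = buildT m n (fun x y => Sv maze m n t j x y false) ∧
  st.s1 = buildT m n (fun x y => Sv maze m n t j x y true)

theorem buildT_congr {m n : Int} {g g' : Int → Int → Bool}
    (h : ∀ x y, 0 ≤ x → x < m → 0 ≤ y → y < n → g x y = g' x y) :
    buildT m n g = buildT m n g' := by
  unfold buildT
  refine List.map_congr_left ?_
  intro x hx
  rw [PySem.List.mem_pyRange_one] at hx
  refine List.map_congr_left ?_
  intro y hy
  rw [PySem.List.mem_pyRange_one] at hy
  exact h x y hx.1 hx.2 hy.1 hy.2

theorem tget_buildT {m n x y : Int} (g : Int → Int → Bool)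
    (hx : 0 ≤ x) (hx' : x < m) (hy : 0 ≤ y) (hy' : y < n) :
    tget (buildT m n g) x y = g x y := by
  unfold tget buildT
  have hxm : x.toNat < (m - 0).toNat := by omega
  have hyn : y.toNat < (n - 0).toNat := by omega
  simp only [PySem.List.pyRange_one]
  rw [PySem.List.pyGet?_of_nonneg _ hx]
  simp only [List.getElem?_map, List.getElem?_range, hxm, Option.map_some, Option.getD_some]
  rw [PySem.List.pyGet?_of_nonneg _ hy]
  simp only [List.getElem?_map, List.getElem?_range, hyn, Option.map_some, Option.getD_some]
  congr 1 <;> omega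

theorem dfsA_fuel (maze : List (List String)) (m n t : Int) :
    ∀ (f f' : Nat) (x y time : Int) (a b : Bool),
      0 ≤ x → x < m → 0 ≤ y → y < n →
      (t - time - 1).toNat ≤ f → (t - time - 1).toNat ≤ f' →
      dfsA maze m n t f x y time a b = dfsA maze m n t f' x y time a b := by
  intro f
  induction f with
  | zero =>
    intro f' x y time a b hx hx' hy hy' hf hf'
    have hgu : time + 1 = t ∨ t - time - 1 < m - x + n - y - 2 := by omega
    conv_lhs => rw [dfsA.eq_def]
    conv_rhs => rw [dfsA.eq_def]
    by_cases hg : x = m - 1 ∧ y = n - 1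
    · rw [if_pos hg, if_pos hg]
    · rw [if_neg hg, if_neg hg, if_pos hgu, if_pos hgu]
  | succ f ih =>
    intro f' x y time a b hx hx' hy hy' hf hf'
    conv_lhs => rw [dfsA.eq_def]
    conv_rhs => rw [dfsA.eq_def]
    by_cases h1 : t - time - 1 ≤ 0
    · have hgu : time + 1 = t ∨ t - time - 1 < m - x + n - y - 2 := by omega
      by_cases hg : x = m - 1 ∧ y = n - 1
      · rw [if_pos hg, if_pos hg]
      · rw [if_neg hg, if_neg hg, if_pos hgu, if_pos hgu]
    · obtain ⟨f'', rfl⟩ : ∃ f'', f' = f'' + 1 := ⟨f' - 1, by omega⟩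
      by_cases hg : x = m - 1 ∧ y = n - 1
      · rw [if_pos hg, if_pos hg]
      · by_cases hgu : time + 1 = t ∨ t - time - 1 < m - x + n - y - 2
        · rw [if_neg hg, if_neg hg, if_pos hgu, if_pos hgu]
        · rw [if_neg hg, if_neg hg, if_neg hgu, if_neg hgu]
          have hrec : ∀ x_ y_ : Int, 0 ≤ x_ → x_ < m → 0 ≤ y_ → y_ < n →
              (if pvCell maze (time + 1) x_ y_ = some '.' then
                 dfsA maze m n t f x_ y_ (time + 1) a b
               else (a && dfsA maze m n t f x_ y_ (time + 1) false b) ||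
                    (b && (PySem.List.pyRange (time + 1) t 1).any fun nt =>
                            dfsA maze m n t f x_ y_ nt a false)) =
              (if pvCell maze (time + 1) x_ y_ = some '.' then
                 dfsA maze m n t f'' x_ y_ (time + 1) a b
               else (a && dfsA maze m n t f'' x_ y_ (time + 1) false b) ||
                    (b && (PySem.List.pyRange (time + 1) t 1).any fun nt =>
                            dfsA maze m n t f'' x_ y_ nt a false)) := by
            intro x_ y_ p1 p2 p3 p4
            have e1 := ih f'' x_ y_ (time + 1) a b p1 p2 p3 p4 (by omega) (by omega)
            have e2 := ih f'' x_ y_ (time + 1) false b p1 p2 p3 p4 (by omega) (by omega)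
            have e3 : ((PySem.List.pyRange (time + 1) t 1).any fun nt =>
                          dfsA maze m n t f x_ y_ nt a false) =
                      ((PySem.List.pyRange (time + 1) t 1).any fun nt =>
                          dfsA maze m n t f'' x_ y_ nt a false) := by
              apply PySem.List.any_congr_mem
              intro nt hnt
              rw [PySem.List.mem_pyRange_one] at hnt
              exact ih f'' x_ y_ nt a false p1 p2 p3 p4 (by omega) (by omega)
            rw [e1, e2, e3]
          apply PySem.List.any_congr_mem
          intro d hd
          have hdb : -1 ≤ d.1 ∧ d.1 ≤ 1 ∧ -1 ≤ d.2 ∧ d.2 ≤ 1 := by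
            fin_cases hd <;> simp
          by_cases hb : x + d.1 < 0 ∨ x + d.1 = m ∨ y + d.2 < 0 ∨ y + d.2 = n
          · rw [if_pos hb, if_pos hb]
          · rw [if_neg hb, if_neg hb]
            push Not at hb
            exact hrec _ _ (by omega) (by omega) (by omega) (by omega)

theorem step_eq (maze : List (List String)) (m n t time : Int)
    (_h0 : 0 ≤ time) (h2 : time ≤ t - 2) (a b : Bool) :
    stepB maze m n t time
      (buildT m n fun x y => Dv maze m n t (time + 1) x y a b)
      (buildT m n fun x y => Dv maze m n t (time + 1) x y false b)
      (buildT m n fun x y => Sv maze m n t (time + 1) x y a) a b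
    = buildT m n (fun x y => Dv maze m n t time x y a b) := by
  have hfe : (t - time - 1).toNat = (t - time - 2).toNat + 1 := by omega
  have hfe2 : (t - (time + 1) - 1).toNat = (t - time - 2).toNat := by omega
  unfold stepB
  apply buildT_congr
  intro x y hx hx' hy hy'
  conv_rhs => simp only [Dv]
  rw [hfe]
  conv_rhs => rw [dfsA.eq_def]
  by_cases hg : x = m - 1 ∧ y = n - 1
  · rw [if_pos hg, if_pos hg]
  · rw [if_neg hg, if_neg hg]
    by_cases hp : t - time - 1 < m - x + n - y - 2
    · rw [if_pos hp, if_pos (Or.inr hp)]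
    · have hgu : ¬(time + 1 = t ∨ t - time - 1 < m - x + n - y - 2) := by omega
      rw [if_neg hp, if_neg hgu]
      apply PySem.List.any_congr_mem
      intro d hd
      have hdb : -1 ≤ d.1 ∧ d.1 ≤ 1 ∧ -1 ≤ d.2 ∧ d.2 ≤ 1 := by fin_cases hd <;> simp
      by_cases hb : 0 ≤ x + d.1 ∧ x + d.1 < m ∧ 0 ≤ y + d.2 ∧ y + d.2 < n
      · rw [if_pos hb]
        have hbA : ¬(x + d.1 < 0 ∨ x + d.1 = m ∨ y + d.2 < 0 ∨ y + d.2 = n) := by omega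
        rw [if_neg hbA]
        obtain ⟨b1, b2, b3, b4⟩ := hb
        by_cases hc : pvCell maze (time + 1) (x + d.1) (y + d.2) = some '.'
        · rw [if_pos hc, if_pos hc, tget_buildT _ b1 b2 b3 b4]
          simp only [Dv, hfe2]
        · rw [if_neg hc, if_neg hc, tget_buildT _ b1 b2 b3 b4, tget_buildT _ b1 b2 b3 b4]
          have e2 : Sv maze m n t (time + 1) (x + d.1) (y + d.2) a =
              (PySem.List.pyRange (time + 1) t 1).any fun nt =>
                dfsA maze m n t ((t - time - 2).toNat) (x + d.1) (y + d.2) nt a false := by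
            simp only [Sv]
            apply PySem.List.any_congr_mem
            intro nt hnt
            rw [PySem.List.mem_pyRange_one] at hnt
            simp only [Dv]
            exact dfsA_fuel maze m n t _ _ _ _ _ _ _ b1 b2 b3 b4 (by omega) (by omega)
          rw [e2]
          simp only [Dv, hfe2]
      · rw [if_neg hb]
        have hbA : x + d.1 < 0 ∨ x + d.1 = m ∨ y + d.2 < 0 ∨ y + d.2 = n := by omega
        rw [if_pos hbA]

theorem Sv_cons (maze : List (List String)) (m n t j x y : Int) (a : Bool) (h : j < t) :
    Sv maze m n t j x y a = (Dv maze m n t j x y a false || Sv maze m n t (j + 1) x y a) := by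
  simp only [Sv]
  rw [PySem.List.pyRange_one_cons h, List.any_cons]

theorem loop_inv (maze : List (List String)) (m n t : Int) :
    ∀ (k : Nat) (st : BSt), (k : Int) ≤ t - 1 → InvT maze m n t k st →
      InvT maze m n t 0 (loopB maze m n t k ((k : Int) - 1) st) := by
  intro k
  induction k with
  | zero =>
    intro st _ h
    simp only [loopB]
    exact_mod_cast h
  | succ k ih =>
    intro st hk hInv
    have hc1 : ((k + 1 : Nat) : Int) = (k : Int) + 1 := by push_cast; ring
    rw [hc1] at hInv hk ⊢
    obtain ⟨h1, h2, h3, h4, h5, h6⟩ := hInv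
    simp only [loopB]
    have hc2 : (k : Int) + 1 - 1 = (k : Int) := by ring
    rw [hc2, h1, h2, h3, h4, h5, h6]
    rw [step_eq maze m n t (k : Int) (by omega) (by omega) false false,
        step_eq maze m n t (k : Int) (by omega) (by omega) true false,
        step_eq maze m n t (k : Int) (by omega) (by omega) false true,
        step_eq maze m n t (k : Int) (by omega) (by omega) true true]
    refine ih _ (by omega) ⟨rfl, rfl, rfl, rfl, ?_, ?_⟩
    · apply buildT_congr
      intro x y hx hx' hy hy'
      rw [tget_buildT _ hx hx' hy hy', tget_buildT _ hx hx' hy hy',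
          Sv_cons maze m n t (k : Int) x y false (by omega)]
      exact Bool.or_comm _ _
    · apply buildT_congr
      intro x y hx hx' hy hy'
      rw [tget_buildT _ hx hx' hy hy', tget_buildT _ hx hx' hy hy',
          Sv_cons maze m n t (k : Int) x y true (by omega)]
      exact Bool.or_comm _ _

theorem base_pt (maze : List (List String)) (m n t x y : Int) (a b : Bool) :
    Dv maze m n t (t - 1) x y a b = decide (x = m - 1 ∧ y = n - 1) := by
  simp only [Dv]
  have h0 : (t - (t - 1) - 1).toNat = 0 := by omega
  rw [h0, dfsA.eq_def]
  by_cases hg : x = m - 1 ∧ y = n - 1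
  · rw [if_pos hg]
    simp [hg]
  · rw [if_neg hg, if_pos (Or.inl (by omega))]
    simp [hg]

theorem base_spt (maze : List (List String)) (m n t x y : Int) (a : Bool) :
    Sv maze m n t (t - 1) x y a = decide (x = m - 1 ∧ y = n - 1) := by
  rw [Sv_cons maze m n t (t - 1) x y a (by omega), base_pt]
  simp [Sv]

theorem base_inv (maze : List (List String)) (m n t : Int) :
    InvT maze m n t (t - 1)
      ⟨buildT m n fun x y => decide (x = m - 1 ∧ y = n - 1),
       buildT m n fun x y => decide (x = m - 1 ∧ y = n - 1),
       buildT m n fun x y => decide (x = m - 1 ∧ y = n - 1),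
       buildT m n fun x y => decide (x = m - 1 ∧ y = n - 1),
       buildT m n fun x y => decide (x = m - 1 ∧ y = n - 1),
       buildT m n fun x y => decide (x = m - 1 ∧ y = n - 1)⟩ := by
  refine ⟨?_, ?_, ?_, ?_, ?_, ?_⟩ <;>
  · apply buildT_congr
    intro x y _ _ _ _
    first
    | exact (base_pt maze m n t x y _ _).symm
    | exact (base_spt maze m n t x y _).symm

-- ===== VERDICT (by name: the statement is the Claim_ definition above) =====
theorem escapeMaze_spec : Claim_equal_escapeMaze := by
  unfold Claim_equal_escapeMaze
  intro maze _ hPre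
  unfold Spec_escapeMaze escapeMaze escapeMaze_alt
  obtain ⟨hne, hne0, hn0, _⟩ := hPre
  cases maze with
  | nil => exact absurd rfl hne
  | cons l0 rest =>
    cases l0 with
    | nil => simp at hne0
    | cons r0 rows =>
      set maze := (r0 :: rows) :: rest with hmz
      set m : Int := PySem.List.len ((PySem.List.pyGet? maze 0).getD []) with hm
      set n : Int := PySem.Str.len
        ((PySem.List.pyGet? ((PySem.List.pyGet? maze 0).getD []) 0).getD "") with hn
      set t : Int := PySem.List.len maze with ht
      have hget0 : (PySem.List.pyGet? maze 0).getD [] = r0 :: rows := by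
        rw [hmz, PySem.List.pyGet?_zero_cons, Option.getD_some]
      have hm1 : 1 ≤ m := by
        rw [hm, hget0]
        simp [PySem.List.len_eq]
      have hn1 : 1 ≤ n := by
        rw [hn, hget0, PySem.List.pyGet?_zero_cons, Option.getD_some]
        simpa using hn0
      have ht1 : 1 ≤ t := by
        rw [ht, hmz]
        simp [PySem.List.len_eq]
      have hA : dfsA maze m n t t.toNat 0 0 0 true true = Dv maze m n t 0 0 0 true true := by
        simp only [Dv]
        exact dfsA_fuel maze m n t t.toNat ((t - 0 - 1).toNat) 0 0 0 true true
          le_rfl (by omega) le_rfl (by omega) (by omega) (by omega)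
      have hcast : (((t - 1).toNat : Nat) : Int) = t - 1 := by omega
      have hbase := base_inv maze m n t
      rw [← hcast] at hbase
      have hloop := loop_inv maze m n t (t - 1).toNat _ (by omega) hbase
      rw [hcast] at hloop
      have ht2 : t - 1 - 1 = t - 2 := by ring
      rw [ht2] at hloop
      obtain ⟨_, _, _, h11, _, _⟩ := hloop
      show dfsA maze m n t t.toNat 0 0 0 true true =
        tget (loopB maze m n t (t - 1).toNat (t - 2)
          ⟨buildT m n fun x y => decide (x = m - 1 ∧ y = n - 1),
           buildT m n fun x y => decide (x = m - 1 ∧ y = n - 1),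
           buildT m n fun x y => decide (x = m - 1 ∧ y = n - 1),
           buildT m n fun x y => decide (x = m - 1 ∧ y = n - 1),
           buildT m n fun x y => decide (x = m - 1 ∧ y = n - 1),
           buildT m n fun x y => decide (x = m - 1 ∧ y = n - 1)⟩).f11 0 0
      rw [hA, h11, tget_buildT _ le_rfl (by omega) le_rfl (by omega)]
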